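-- pv_equiv track=rewrite | github.com/brennandolson/stats | brute_force.py | half_paths
-- ===== SOURCE A (Python) =====
-- def half_paths(n, k):
--   '''generates the valid paths of
--      R and D which walk halfway through
--      an (n+1)-by-(n+1) grid starting
--      in the upper right corner
--      without crossing the diagonal'''
--   if n == 0:
--     yield ''
--     return
--
--   if k > 0:
--     for path in half_paths(n - 1, k - 1):
--       yield 'D' + path
--
--   for path in half_paths(n - 1, k + 1):
--     yield 'R' + path
--
--   return
-- ===== SOURCE B (Python) =====
-- def half_paths(n, k):
--   '''iterative DFS with an explicit stack instead of recursion;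
--      pushes the R-child first so the LIFO pop emits D before R,
--      reproducing the recursive pre-order exactly'''
--   stack = [(n, k, '')]
--   while stack:
--     m, j, prefix = stack.pop()
--     if m == 0:
--       yield prefix
--     else:
--       stack.append((m - 1, j + 1, prefix + 'R'))
--       if j > 0:
--         stack.append((m - 1, j - 1, prefix + 'D'))
-- ===== Notes on version B (the rewrite author's own statement) =====
-- stated objective: alternative
-- what changed: Replaces the recursive generator (which prepends 'D'/'R' to each string returned by the recursive call) with an iterative pre-order DFS over an explicit stack of (n, k, prefix) tuples that builds each path left-to-right and yields complete prefixes at the leaves.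
import Mathlib
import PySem

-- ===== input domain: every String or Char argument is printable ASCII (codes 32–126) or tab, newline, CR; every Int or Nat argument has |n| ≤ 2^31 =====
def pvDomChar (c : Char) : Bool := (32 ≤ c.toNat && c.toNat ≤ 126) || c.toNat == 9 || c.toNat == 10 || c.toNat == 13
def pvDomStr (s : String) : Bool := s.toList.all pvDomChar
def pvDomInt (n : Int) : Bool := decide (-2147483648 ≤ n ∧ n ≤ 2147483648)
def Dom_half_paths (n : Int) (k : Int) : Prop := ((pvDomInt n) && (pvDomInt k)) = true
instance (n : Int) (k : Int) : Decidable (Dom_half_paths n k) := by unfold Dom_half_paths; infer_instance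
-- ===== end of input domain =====

-- B replaces A's recursive generator by an iterative explicit-stack pre-order DFS
-- that accumulates each path as a growing prefix (objective: alternative; same cost).


-- ===== PORT A =====
-- A recurses on n down to 0; Pre_ restricts to n ≥ 0, where n.toNat = n.
def halfPathsRec : Nat → Int → List String
  | 0, _ => [""]
  | Nat.succ m, k =>
      (if 0 < k then (halfPathsRec m (k - 1)).map (fun p => "D" ++ p) else [])
        ++ (halfPathsRec m (k + 1)).map (fun p => "R" ++ p)

def half_paths (n : Int) (k : Int) : List String := halfPathsRec n.toNat k

-- ===== PORT B =====
-- termination helper for the stack loop below (cited by its decreasing_by)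
theorem pvThreePowPos (m : Nat) : 0 < 3 ^ m := Nat.pow_pos (by omega)

-- stack: head = top; pop the top; at a leaf emit the prefix; otherwise push the
-- R-child first, then (if j > 0) the D-child, so D is popped before R.
def halfPathsLoop : List (Nat × Int × String) → List String
  | [] => []
  | (0, _, p) :: rest => p :: halfPathsLoop rest
  | (Nat.succ m, j, p) :: rest =>
      if 0 < j then
        halfPathsLoop ((m, j - 1, p ++ "D") :: (m, j + 1, p ++ "R") :: rest)
      else
        halfPathsLoop ((m, j + 1, p ++ "R") :: rest)
  termination_by st => (st.map (fun t => 3 ^ t.1)).sum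
  decreasing_by
    all_goals simp only [List.map_cons, List.sum_cons, pow_succ, pow_zero]
    · omega
    · have h := pvThreePowPos m; omega
    · have h := pvThreePowPos m; omega

def half_paths_alt (n : Int) (k : Int) : List String := halfPathsLoop [(n.toNat, k, "")]

-- ===== PRECONDITION & SPEC =====
-- Pre_ excludes n < 0, where A's recursion never reaches its base case and raises RecursionError.
def Pre_half_paths (n : Int) (k : Int) : Prop := 0 ≤ n
instance (n : Int) (k : Int) : Decidable (Pre_half_paths n k) := by unfold Pre_half_paths; infer_instance
def pvWitness_half_paths : Int × Int := (3, 1)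
def Spec_half_paths (n : Int) (k : Int) (out : List String) : Prop := out = half_paths_alt n k
instance (n : Int) (k : Int) (out : List String) : Decidable (Spec_half_paths n k out) := by unfold Spec_half_paths; infer_instance

-- ===== CLAIM (what is proved, stated in full; the proofs are below) =====
def Claim_equal_half_paths : Prop := ∀ (n : Int) (k : Int), Dom_half_paths n k → Pre_half_paths n k → Spec_half_paths n k (half_paths n k)

-- ===== LEMMAS AND PROOFS =====

-- the stack loop processes each frame into that frame's subtree of paths, prefixed.
theorem halfPathsLoop_spec (st : List (Nat × Int × String)) :
    halfPathsLoop st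
      = (st.map (fun t => (halfPathsRec t.1 t.2.1).map (fun p => t.2.2 ++ p))).flatten := by
  induction st using halfPathsLoop.induct with
  | case1 => simp [halfPathsLoop]
  | case2 j p rest ih =>
      simp [halfPathsLoop, halfPathsRec, ih]
  | case3 m j p rest hj ih =>
      rw [halfPathsLoop, if_pos hj, ih]
      simp [halfPathsRec, if_pos hj, List.map_map, Function.comp_def, String.append_assoc]
  | case4 m j p rest hj ih =>
      rw [halfPathsLoop, if_neg hj, ih]
      simp [halfPathsRec, if_neg hj, List.map_map, Function.comp_def, String.append_assoc]

-- ===== VERDICT (by name: the statement is the Claim_ definition above) =====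
theorem half_paths_spec : Claim_equal_half_paths := by
  intro n k _ _
  unfold Spec_half_paths half_paths half_paths_alt
  rw [halfPathsLoop_spec]
  simp
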